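-- pv_equiv track=rewrite | github.com/whiteprincewithobsession/IGI | 253502_Yastremskiy_29/IGI/LR3/task5.py | find_product_between_zeros
-- ===== SOURCE A (Python) =====
-- def find_product_between_zeros(sequence : list) -> float:
--     """
--     A function that finds the product of all elements enclosed between the first two zeros
--     """
--     try:
--         first_zero_index = sequence.index(0)
--         second_zero_index = sequence.index(0, first_zero_index + 1)
--     except:
--         raise Exception("The required number of null elements is missing")
--     product = 1
--     for i in range(first_zero_index + 1, second_zero_index):
--         product *= sequence[i]
--     if first_zero_index == second_zero_index - 1:
--         return 0
--     return product
-- ===== SOURCE B (Python) =====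
-- def find_product_between_zeros(sequence : list) -> float:
--     """
--     A function that finds the product of all elements enclosed between the first two zeros
--     """
--     first = None
--     product = 1
--     for idx, x in enumerate(sequence):
--         if x == 0:
--             if first is None:
--                 first = idx
--             else:
--                 return 0 if idx == first + 1 else product
--         elif first is not None:
--             product *= x
--     raise Exception("The required number of null elements is missing")
-- ===== Notes on version B (the rewrite author's own statement) =====
-- stated objective: simpler
-- what changed: Replaces the two list.index scans plus an index-range product loop with a single fused enumerate pass that tracks the first-zero position and accumulates the product until the second zero.
import Mathlib
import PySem

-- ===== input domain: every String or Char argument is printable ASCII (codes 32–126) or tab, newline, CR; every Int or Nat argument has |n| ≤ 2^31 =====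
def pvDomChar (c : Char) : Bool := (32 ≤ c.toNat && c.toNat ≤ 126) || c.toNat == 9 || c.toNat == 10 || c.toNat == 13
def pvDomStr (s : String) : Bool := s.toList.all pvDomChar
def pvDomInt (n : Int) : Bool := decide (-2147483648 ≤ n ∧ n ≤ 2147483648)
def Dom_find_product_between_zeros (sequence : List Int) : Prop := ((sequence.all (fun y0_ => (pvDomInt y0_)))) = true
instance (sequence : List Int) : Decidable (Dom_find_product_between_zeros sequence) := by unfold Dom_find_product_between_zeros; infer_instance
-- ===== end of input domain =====

-- B fuses A's two list.index scans and the index-range product loop into one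
-- enumerate pass (objective: simpler, same O(n) cost). A raises when the list
-- holds fewer than two zeros; those inputs are outside Pre_.

-- ===== PORT A =====
-- sequence.index(0), then sequence.index(0, first+1) (ported as index? on the
-- dropped tail plus the offset), then the range-product loop; the `none`
-- branches correspond to the exception and are excluded by Pre_.
def find_product_between_zeros (sequence : List Int) : Int :=
  match PySem.List.index? sequence 0 with
  | none => 0
  | some i =>
    match PySem.List.index? (sequence.drop (i + 1)) 0 with
    | none => 0
    | some j' =>
      let first_zero_index : Int := i
      let second_zero_index : Int := i + 1 + j'
      let product := (PySem.List.pyRange (first_zero_index + 1) second_zero_index 1).foldl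
        (fun p k => p * PySem.List.pyGetD sequence k 0) 1
      if first_zero_index == second_zero_index - 1 then 0 else product

-- ===== PORT B =====
-- one pass: idx is the enumerate counter, first the position of the first zero
-- once seen, product the running product; [] = falling off the loop (the
-- exception, outside Pre_).
def pvAltLoop (l : List Int) (idx : Int) (first : Option Int) (product : Int) : Int :=
  match l with
  | [] => 0
  | x :: rest =>
    if x == 0 then
      match first with
      | none => pvAltLoop rest (idx + 1) (some idx) product
      | some f => if idx == f + 1 then 0 else product
    else
      match first with
      | some _ => pvAltLoop rest (idx + 1) first (product * x)
      | none => pvAltLoop rest (idx + 1) first product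

def find_product_between_zeros_alt (sequence : List Int) : Int :=
  pvAltLoop sequence 0 none 1

-- ===== PRECONDITION & SPEC =====
-- A (and B) raise Exception when the list contains fewer than two zeros.
def Pre_find_product_between_zeros (sequence : List Int) : Prop := 2 ≤ sequence.count 0
instance (sequence : List Int) : Decidable (Pre_find_product_between_zeros sequence) := by unfold Pre_find_product_between_zeros; infer_instance
def pvWitness_find_product_between_zeros : List Int := [3, 0, 2, 5, 0, 7]

def Spec_find_product_between_zeros (sequence : List Int) (out : Int) : Prop := out = find_product_between_zeros_alt sequence
instance (sequence : List Int) (out : Int) : Decidable (Spec_find_product_between_zeros sequence out) := by unfold Spec_find_product_between_zeros; infer_instance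

-- ===== CLAIM (what is proved, stated in full; the proofs are below) =====
def Claim_equal_find_product_between_zeros : Prop := ∀ (sequence : List Int), Dom_find_product_between_zeros sequence → Pre_find_product_between_zeros sequence → Spec_find_product_between_zeros sequence (find_product_between_zeros sequence)

-- ===== LEMMAS AND PROOFS =====

-- any list with at least one zero splits as q ++ 0 :: r with 0 ∉ q
lemma pv_split1 (l : List Int) (h : 1 ≤ l.count 0) :
    ∃ q r, l = q ++ 0 :: r ∧ 0 ∉ q := by
  induction l with
  | nil => simp at h
  | cons x t ih =>
    by_cases hx : x = 0
    · exact ⟨[], t, by simp [hx], by simp⟩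
    · have : 1 ≤ t.count 0 := by simpa [List.count_cons, hx] using h
      obtain ⟨q, r, he, hq⟩ := ih this
      exact ⟨x :: q, r, by simp [he], by simp [hq, eq_comm, hx]⟩

-- any list with at least two zeros splits around its first two zeros
lemma pv_split2 (l : List Int) (h : 2 ≤ l.count 0) :
    ∃ p q r, l = p ++ 0 :: (q ++ 0 :: r) ∧ 0 ∉ p ∧ 0 ∉ q := by
  induction l with
  | nil => simp at h
  | cons x t ih =>
    by_cases hx : x = 0
    · have : 1 ≤ t.count 0 := by
        rw [hx, List.count_cons_self] at h; omega
      obtain ⟨q, r, he, hq⟩ := pv_split1 t this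
      exact ⟨[], q, r, by simp [hx, he], by simp, hq⟩
    · have : 2 ≤ t.count 0 := by simpa [List.count_cons, hx] using h
      obtain ⟨p, q, r, he, hp, hq⟩ := ih this
      exact ⟨x :: p, q, r, by simp [he], by simp [hp, eq_comm, hx], hq⟩

lemma pv_index?_first {p t : List Int} (hp : (0:Int) ∉ p) :
    PySem.List.index? (p ++ 0 :: t) 0 = some p.length := by
  rw [PySem.List.index?_eq_some_iff]
  exact ⟨p, t, rfl, rfl, hp⟩

-- range-product over indices covering exactly the middle block q
lemma pv_prodRange (q : List Int) : ∀ (pre suf : List Int) (acc : Int),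
    (PySem.List.pyRange (pre.length : Int) ((pre.length : Int) + q.length) 1).foldl
      (fun p k => p * PySem.List.pyGetD (pre ++ (q ++ suf)) k 0) acc = acc * q.prod := by
  induction q with
  | nil =>
    intro pre suf acc
    rw [PySem.List.pyRange_one_eq_nil (by simp)]
    simp
  | cons x t ih =>
    intro pre suf acc
    have hlt : (pre.length : Int) < (pre.length : Int) + (x :: t).length := by
      simp only [List.length_cons]
      push_cast
      omega
    rw [PySem.List.pyRange_one_cons hlt]
    simp only [List.foldl_cons]
    have hget : PySem.List.pyGetD (pre ++ (x :: t ++ suf)) (pre.length : Int) 0 = x := by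
      rw [PySem.List.pyGetD_natCast]
      simp [List.getD, List.getElem?_append_right]
    rw [hget]
    have hinst := ih (pre ++ [x]) suf (acc * x)
    simp only [List.append_assoc, List.singleton_append, List.length_append,
      List.length_singleton, List.length_cons, List.length_nil, Nat.cast_add, Nat.cast_one, Nat.cast_zero, List.cons_append, zero_add, List.nil_append] at hinst ⊢
    rw [show (pre.length : Int) + ((t.length : Int) + 1) = (pre.length : Int) + 1 + (t.length : Int) by ring]
    rw [hinst, List.prod_cons]
    ring

lemma pv_A_value (p q r : List Int) (hp : (0:Int) ∉ p) (hq : (0:Int) ∉ q) :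
    find_product_between_zeros (p ++ 0 :: (q ++ 0 :: r)) =
      if q = [] then 0 else q.prod := by
  have hdrop : (p ++ 0 :: (q ++ 0 :: r)).drop (p.length + 1) = q ++ 0 :: r := by
    have : p ++ 0 :: (q ++ 0 :: r) = (p ++ [0]) ++ (q ++ 0 :: r) := by simp
    rw [this]
    have hl : p.length + 1 = (p ++ [0]).length := by simp
    rw [hl, List.drop_left]
  simp only [find_product_between_zeros, pv_index?_first hp, hdrop, pv_index?_first hq]
  have hpre : p ++ 0 :: (q ++ 0 :: r) = (p ++ [0]) ++ (q ++ 0 :: r) := by simp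
  have hb : ((p.length : Int) + 1) = (((p ++ [0]).length : Int)) := by simp
  rw [hpre, hb, pv_prodRange q (p ++ [0]) (0 :: r) 1]
  by_cases hqe : q = []
  · simp [hqe]
  · have hql : q.length ≠ 0 := by simpa using hqe
    rw [if_neg (by simp; omega), if_neg hqe]
    ring

lemma pv_altLoop_skip (p : List Int) (hp : (0:Int) ∉ p) :
    ∀ (l : List Int) (idx prod : Int),
      pvAltLoop (p ++ l) idx none prod = pvAltLoop l (idx + p.length) none prod := by
  induction p with
  | nil => intro l idx prod; simp [pvAltLoop]
  | cons x t ih =>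
    intro l idx prod
    have hx : x ≠ 0 := by intro h; exact hp (by simp [h])
    have ht : (0:Int) ∉ t := fun h => hp (by simp [h])
    simp only [List.cons_append, pvAltLoop, beq_iff_eq, hx, if_false, ite_false]
    rw [ih ht l (idx + 1) prod,
      show idx + 1 + (t.length : Int) = idx + ((x :: t).length : Int) by push_cast [List.length_cons]; ring]

lemma pv_altLoop_mul (q : List Int) (hq : (0:Int) ∉ q) :
    ∀ (l : List Int) (idx f prod : Int),
      pvAltLoop (q ++ l) idx (some f) prod = pvAltLoop l (idx + q.length) (some f) (prod * q.prod) := by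
  induction q with
  | nil => intro l idx f prod; simp [pvAltLoop]
  | cons x t ih =>
    intro l idx f prod
    have hx : x ≠ 0 := by intro h; exact hq (by simp [h])
    have ht : (0:Int) ∉ t := fun h => hq (by simp [h])
    simp only [List.cons_append, pvAltLoop, beq_iff_eq, hx, if_false, ite_false]
    rw [ih ht l (idx + 1) f (prod * x),
      show idx + 1 + (t.length : Int) = idx + ((x :: t).length : Int) by push_cast [List.length_cons]; ring,
      show prod * x * t.prod = prod * (x :: t).prod by rw [List.prod_cons]; ring]

lemma pv_B_value (p q r : List Int) (hp : (0:Int) ∉ p) (hq : (0:Int) ∉ q) :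
    find_product_between_zeros_alt (p ++ 0 :: (q ++ 0 :: r)) =
      if q = [] then 0 else q.prod := by
  unfold find_product_between_zeros_alt
  rw [pv_altLoop_skip p hp]
  simp only [pvAltLoop, beq_self_eq_true, if_true]
  rw [pv_altLoop_mul q hq]
  simp only [pvAltLoop, beq_self_eq_true, if_true, beq_iff_eq]
  by_cases hqe : q = []
  · simp [hqe]
  · have : q.length ≠ 0 := by simpa using hqe
    rw [if_neg (by push_cast; omega), if_neg hqe]
    ring

-- ===== VERDICT (by name: the statement is the Claim_ definition above) =====
theorem find_product_between_zeros_spec : Claim_equal_find_product_between_zeros := by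
  intro sequence _ hpre
  obtain ⟨p, q, r, he, hp, hq⟩ := pv_split2 sequence hpre
  unfold Spec_find_product_between_zeros
  rw [he, pv_A_value p q r hp hq, pv_B_value p q r hp hq]
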